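-- pv_equiv track=rewrite | github.com/joshkung25/fetch-ai | parser/pdf_parser.py | split_by_nth_occurrence
-- ===== SOURCE A (Python) =====
-- def split_by_nth_occurrence(text, splitter, n=12):
--     """
--     Split text by every nth occurrence of the splitter.
--     """
--     parts = text.split(splitter)
--     result = []
--     current_chunk = []
--
--     for i, part in enumerate(parts):
--         current_chunk.append(part)
--         if (i + 1) % n == 0:  # Every nth occurrence
--             result.append(splitter.join(current_chunk))
--             current_chunk = []
--
--     # Add any remaining parts
--     if current_chunk:
--         result.append(splitter.join(current_chunk))
--
--     return result
-- ===== SOURCE B (Python) =====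
-- def split_by_nth_occurrence(text, splitter, n=12):
--     """
--     Split text by every nth occurrence of the splitter.
--     """
--     parts = text.split(splitter)
--     return [splitter.join(parts[i:i + n]) for i in range(0, len(parts), n)]
-- ===== Notes on version B (the rewrite author's own statement) =====
-- stated objective: simpler
-- what changed: Replaces the accumulate-and-flush-with-modulo loop (running chunk buffer, (i+1)%n test, trailing-remainder branch) by a single stride over range(0, len(parts), n) joining fixed slices parts[i:i+n]. Pre_ excludes splitter='' and n=0, on which A raises (ValueError/ZeroDivisionError), and n<0, where A's grouping by |n| is an accident of the modulo test and B's empty result from a negative range step is equally accidental.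
-- outside the precondition, e.g. on split_by_nth_occurrence('a,b,c,d', ',', -2): A returns ['a,b', 'c,d'], B returns []; on split_by_nth_occurrence('a,b', ',', 0): A raises ZeroDivisionError, B raises ValueError; on split_by_nth_occurrence('ab', '', 2): A raises ValueError, B raises ValueError
import Mathlib
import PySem

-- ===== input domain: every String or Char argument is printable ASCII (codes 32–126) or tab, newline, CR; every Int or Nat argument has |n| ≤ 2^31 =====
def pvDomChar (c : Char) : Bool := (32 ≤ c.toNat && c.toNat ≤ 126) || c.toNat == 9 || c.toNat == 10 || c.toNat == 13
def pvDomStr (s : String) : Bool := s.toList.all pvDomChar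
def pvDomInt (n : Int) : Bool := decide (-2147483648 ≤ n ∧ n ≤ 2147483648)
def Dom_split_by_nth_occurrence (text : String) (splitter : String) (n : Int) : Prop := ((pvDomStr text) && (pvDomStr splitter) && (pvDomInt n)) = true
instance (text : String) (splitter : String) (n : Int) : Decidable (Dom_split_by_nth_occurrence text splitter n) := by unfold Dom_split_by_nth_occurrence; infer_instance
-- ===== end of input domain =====

-- B replaces A's accumulate-and-flush-with-modulo loop by a direct stride over range(0, len(parts), n)
-- joining fixed slices parts[i:i+n]; objective: simpler. Equality of return values is proved on Pre_.

-- ===== PORT A =====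
def split_by_nth_occurrence (text : String) (splitter : String) (n : Int) : List String :=
  let parts := (PySem.Str.split? text splitter).getD []
  let st := (PySem.List.enumerate parts 0).foldl
    (fun (st : List String × List String) (ip : Int × String) =>
      let chunk := st.2 ++ [ip.2]
      if PySem.Int.mod (ip.1 + 1) n == 0 then
        (st.1 ++ [PySem.Str.join splitter chunk], [])
      else
        (st.1, chunk)) ([], [])
  if st.2 ≠ [] then st.1 ++ [PySem.Str.join splitter st.2] else st.1

-- ===== PORT B =====
def split_by_nth_occurrence_alt (text : String) (splitter : String) (n : Int) : List String :=
  let parts := (PySem.Str.split? text splitter).getD []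
  (PySem.List.pyRange 0 (PySem.List.len parts) n).map
    (fun i => PySem.Str.join splitter (PySem.List.slice parts (some i) (some (i + n))))

-- ===== PRECONDITION & SPEC =====
-- Pre_ excludes splitter = "" and n = 0, on which A raises (ValueError / ZeroDivisionError), and n < 0,
-- where A's grouping by |n| is an accident of the modulo test and B's empty result from a negative
-- range step is equally accidental: no caller would specify a non-positive chunk size.
def Pre_split_by_nth_occurrence (text : String) (splitter : String) (n : Int) : Prop :=
  splitter ≠ "" ∧ 0 < n
instance (text : String) (splitter : String) (n : Int) : Decidable (Pre_split_by_nth_occurrence text splitter n) := by unfold Pre_split_by_nth_occurrence; infer_instance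

def pvWitness_split_by_nth_occurrence : String × String × Int := ("a,b,c,d,e", ",", 2)

def Spec_split_by_nth_occurrence (text : String) (splitter : String) (n : Int) (out : List String) : Prop := out = split_by_nth_occurrence_alt text splitter n
instance (text : String) (splitter : String) (n : Int) (out : List String) : Decidable (Spec_split_by_nth_occurrence text splitter n out) := by unfold Spec_split_by_nth_occurrence; infer_instance

-- ===== CLAIM (what is proved, stated in full; the proofs are below) =====
def Claim_equal_split_by_nth_occurrence : Prop := ∀ (text : String) (splitter : String) (n : Int), Dom_split_by_nth_occurrence text splitter n → Pre_split_by_nth_occurrence text splitter n → Spec_split_by_nth_occurrence text splitter n (split_by_nth_occurrence text splitter n)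

-- ===== LEMMAS AND PROOFS =====

-- Reference chunking: join successive groups of (m+1) strings.
def chunksJ (sp : String) (m : Nat) : List String → List String
  | [] => []
  | x :: xs => PySem.Str.join sp (x :: xs.take m) :: chunksJ sp m (xs.drop m)
termination_by l => l.length
decreasing_by simp

theorem chunksJ_nil (sp : String) (m : Nat) : chunksJ sp m [] = [] := by
  rw [chunksJ]

theorem chunksJ_cons (sp : String) (m : Nat) (x : String) (xs : List String) :
    chunksJ sp m (x :: xs) =
      PySem.Str.join sp ((x :: xs).take (m+1)) :: chunksJ sp m ((x :: xs).drop (m+1)) := by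
  rw [chunksJ]; simp

-- A full chunk peels off in front.
theorem chunksJ_append_full (sp : String) (m : Nat) (l t : List String)
    (h : l.length = m + 1) : chunksJ sp m (l ++ t) = PySem.Str.join sp l :: chunksJ sp m t := by
  rcases l with _ | ⟨y, ys⟩
  · simp at h
  · rw [List.cons_append, chunksJ_cons, ← List.cons_append,
        List.take_left' h, List.drop_left' h]

-- A short final chunk is one group.
theorem chunksJ_short (sp : String) (m : Nat) (y : String) (ys : List String)
    (h : (y :: ys).length ≤ m + 1) : chunksJ sp m (y :: ys) = [PySem.Str.join sp (y :: ys)] := by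
  rw [chunksJ_cons, List.take_of_length_le h, List.drop_eq_nil_of_le h, chunksJ_nil]


theorem pyRange_pos_nil (a b s : Int) (hs : 0 < s) (h : b ≤ a) :
    PySem.List.pyRange a b s = [] := by
  rw [PySem.List.pyRange_of_pos a b hs]
  simp [show ¬ (a < b) by omega]

theorem pyRange_pos_cons (a b s : Int) (hs : 0 < s) (hab : a < b) :
    PySem.List.pyRange a b s = a :: PySem.List.pyRange (a + s) b s := by
  rw [PySem.List.pyRange_of_pos a b hs, PySem.List.pyRange_of_pos (a+s) b hs]
  by_cases h : a + s < b
  · have hcnt : ((b - a + s - 1) / s) = ((b - (a+s) + s - 1) / s) + 1 := by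
      have : b - a + s - 1 = (b - (a+s) + s - 1) + 1 * s := by ring
      rw [this, Int.add_mul_ediv_right _ _ (by omega : s ≠ 0)]
    have hpos : 0 ≤ (b - (a+s) + s - 1) / s := Int.ediv_nonneg (by omega) (by omega)
    simp only [if_pos hab, if_pos h, hcnt]
    rw [show ((b - (a+s) + s - 1) / s + 1).toNat = ((b - (a+s) + s - 1) / s).toNat + 1 by omega]
    rw [List.range_succ_eq_map]
    simp only [List.map_cons, List.map_map]
    congr 1
    · simp
    · apply List.map_congr_left; intro k _; simp; ring
  · have h1 : (b - (a+s) + s - 1) / s = 0 := Int.ediv_eq_zero_of_lt (by omega) (by omega)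
    have h2 : (b - a + s - 1) / s = 1 := by
      have : b - a + s - 1 = (b - (a+s) + s - 1) + 1 * s := by ring
      rw [this, Int.add_mul_ediv_right _ _ (by omega : s ≠ 0), h1]; ring
    simp [if_pos hab, if_neg h, h2, List.range_succ]

theorem pyRange_shift (a b s : Int) (hs : 0 < s) :
    PySem.List.pyRange a b s = (PySem.List.pyRange 0 (b - a) s).map (a + ·) := by
  rw [PySem.List.pyRange_of_pos a b hs, PySem.List.pyRange_of_pos 0 (b-a) hs]
  have : (a < b) = (0 < b - a) := by simp [Int.sub_pos]
  rw [List.map_map]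
  simp only [this, Int.sub_zero, Int.zero_add]
  apply List.map_congr_left; intro k _; simp

-- B's stride-and-slice map computes the reference chunking.
theorem mapSlices (sp : String) (n : Int) (hn : 0 < n) (parts : List String) :
    (PySem.List.pyRange 0 (parts.length : Int) n).map
      (fun i => PySem.Str.join sp (PySem.List.slice parts (some i) (some (i + n)))) =
    chunksJ sp (n.toNat - 1) parts := by
  induction parts using chunksJ.induct (n.toNat - 1) with
  | case1 => simp [pyRange_pos_nil 0 0 n hn le_rfl, chunksJ_nil]
  | case2 x xs ih =>
    have hm1 : n.toNat - 1 + 1 = n.toNat := by omega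
    have hL : (0:Int) < ((x :: xs).length : Int) := by simp
    rw [pyRange_pos_cons 0 _ n hn hL, List.map_cons]
    rw [chunksJ_cons, hm1]
    congr 1
    · -- head: slice from 0 of length n is take n
      rw [show PySem.List.slice (x :: xs) (some 0) (some (0 + n))
            = List.take n.toNat (x :: xs) by
        rw [PySem.List.slice_toNat _ le_rfl (by omega)]
        simp]
    · -- tail
      have hdropx : List.drop n.toNat (x :: xs) = List.drop (n.toNat - 1) xs := by
        rw [show n.toNat = (n.toNat - 1) + 1 by omega]; simp
      rw [zero_add, pyRange_shift n _ n hn, List.map_map, hdropx]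
      have hdrop : ∀ i ∈ PySem.List.pyRange 0 (((x :: xs).length : Int) - n) n,
          PySem.Str.join sp (PySem.List.slice (x :: xs) (some (n + i)) (some (n + i + n)))
            = PySem.Str.join sp (PySem.List.slice (List.drop (n.toNat - 1) xs) (some i) (some (i + n))) := by
        intro i hi
        have hi0 : 0 ≤ i := by
          rcases ((PySem.List.mem_pyRange_iff_of_pos hn i).mp hi) with ⟨h1, _⟩
          exact h1
        rw [PySem.List.slice_toNat _ (by omega) (by omega),
            PySem.List.slice_toNat _ (by omega) (by omega)]
        rw [← hdropx, List.drop_drop]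
        rw [show (n + i).toNat = n.toNat + i.toNat by omega, Nat.add_comm n.toNat i.toNat,
            show (n + i + n).toNat - (i.toNat + n.toNat) = (i + n).toNat - i.toNat by omega]
      rw [List.map_congr_left (fun i hi => by simpa using hdrop i hi)]
      by_cases hle : n ≤ ((x :: xs).length : Int)
      · have hle' : n ≤ (xs.length : Int) + 1 := by
          simp only [List.length_cons] at hle; omega
        have hlen : ((List.drop (n.toNat - 1) xs).length : Int) = ((x :: xs).length : Int) - n := by
          rw [List.length_drop]
          simp only [List.length_cons]
          omega
        rw [← hlen]; exact ih
      · have h1 : PySem.List.pyRange 0 (((x :: xs).length : Int) - n) n = [] := by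
          apply pyRange_pos_nil _ _ _ hn
          simp only [List.length_cons] at hle ⊢
          omega
        have h2 : List.drop (n.toNat - 1) xs = [] := by
          apply List.drop_eq_nil_of_le
          simp only [List.length_cons, Nat.cast_add, Nat.cast_one] at hle
          omega
        rw [h1, h2, List.map_nil, chunksJ_nil]

-- A's flush loop invariant: with the running chunk holding s % n elements, finishing the loop
-- appends the chunking of (chunk ++ remaining parts).
theorem loopA_inv (sp : String) (n : Int) (hn : 0 < n) (parts : List String) :
    ∀ (s : Int) (res c : List String), 0 ≤ s → PySem.Int.mod s n = (c.length : Int) →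
    (let st := (PySem.List.enumerate parts s).foldl
        (fun (st : List String × List String) (ip : Int × String) =>
          let chunk := st.2 ++ [ip.2]
          if PySem.Int.mod (ip.1 + 1) n == 0 then
            (st.1 ++ [PySem.Str.join sp chunk], [])
          else
            (st.1, chunk)) (res, c)
     if st.2 ≠ [] then st.1 ++ [PySem.Str.join sp st.2] else st.1)
    = res ++ chunksJ sp (n.toNat - 1) (c ++ parts) := by
  induction parts with
  | nil =>
    intro s res c hs hmod
    simp only [PySem.List.enumerate_nil, List.foldl_nil, List.append_nil]
    rcases c with _ | ⟨y, ys⟩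
    · simp [chunksJ]
    · have hlt : ((y :: ys).length : Int) < n := by
        rw [← hmod, PySem.Int.mod_eq_emod_of_pos hn]
        exact Int.emod_lt_of_pos s hn
      simp only [ne_eq, reduceCtorEq, not_false_eq_true, if_pos]
      rw [chunksJ_short sp _ y ys (by simp at hlt ⊢; omega)]
  | cons p ps ih =>
    intro s res c hs hmod
    rw [PySem.List.enumerate_cons, List.foldl_cons]
    show (let st := List.foldl
            (fun (st : List String × List String) (ip : Int × String) =>
              let chunk := st.2 ++ [ip.2]
              if PySem.Int.mod (ip.1 + 1) n == 0 then
                (st.1 ++ [PySem.Str.join sp chunk], [])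
              else
                (st.1, chunk))
            (if PySem.Int.mod (s + 1) n == 0 then
              (res ++ [PySem.Str.join sp (c ++ [p])], []) else (res, c ++ [p]))
            (PySem.List.enumerate ps (s + 1))
          if st.2 ≠ [] then st.1 ++ [PySem.Str.join sp st.2] else st.1)
        = res ++ chunksJ sp (n.toNat - 1) (c ++ p :: ps)
    have hmodlt : (c.length : Int) < n := by
      rw [← hmod, PySem.Int.mod_eq_emod_of_pos hn]
      exact Int.emod_lt_of_pos s hn
    have hstep : PySem.Int.mod (s + 1) n = ((c.length : Int) + 1) % n := by
      rw [PySem.Int.mod_eq_emod_of_pos hn]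
      have hdecomp : s + 1 = ((c.length : Int) + 1) + n * (s / n) := by
        have := Int.mul_ediv_add_emod s n
        rw [PySem.Int.mod_eq_emod_of_pos hn] at hmod
        omega
      rw [hdecomp, Int.add_mul_emod_self_left]
    by_cases hfull : (c.length : Int) + 1 = n
    · -- flush: the chunk just reached size n
      have hz : (PySem.Int.mod (s + 1) n == 0) = true := by
        rw [hstep, hfull, Int.emod_self]; rfl
      rw [hz, if_pos (rfl : true = true)]
      have hrec := ih (s + 1) (res ++ [PySem.Str.join sp (c ++ [p])]) [] (by omega)
        (by rw [hstep, hfull, Int.emod_self]; rfl)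
      have hlen : (c ++ [p]).length = n.toNat - 1 + 1 := by simp; omega
      rw [show c ++ p :: ps = (c ++ [p]) ++ ps by simp]
      rw [chunksJ_append_full sp _ _ ps hlen]
      exact hrec.trans (by simp)
    · -- no flush: the chunk grows
      have hnz : (PySem.Int.mod (s + 1) n == 0) = false := by
        rw [hstep, Int.emod_eq_of_lt (by omega) (by omega)]
        simp; omega
      rw [hnz, if_neg (by simp : ¬ (false = true))]
      have hrec := ih (s + 1) res (c ++ [p]) (by omega)
        (by rw [hstep, Int.emod_eq_of_lt (by omega) (by omega)]; simp)
      rw [show c ++ p :: ps = (c ++ [p]) ++ ps by simp]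
      exact hrec

theorem split_by_nth_occurrence_spec : Claim_equal_split_by_nth_occurrence := by
  intro text splitter n _ hpre
  obtain ⟨hsp, hn⟩ := hpre
  unfold Spec_split_by_nth_occurrence split_by_nth_occurrence split_by_nth_occurrence_alt
  simp only [PySem.List.len_eq]
  rw [mapSlices splitter n hn]
  have := loopA_inv splitter n hn ((PySem.Str.split? text splitter).getD []) 0 [] []
    le_rfl (by rw [PySem.Int.mod_eq_emod_of_pos hn]; simp)
  simpa using this
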